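-- pv_equiv track=rewrite | github.com/MinhCreator/python_dev | python/bt_type_dic/binh_chon/binh_chon.py | _read_and_sort
-- ===== SOURCE A (Python) =====
-- def _read_and_sort(lst: list):
--
--     dt = {}
--     tmp = sorted(lst)
--
--     for x in tmp:
--
--         if x not in dt:
--             dt[x] = 1
--         else:
--             dt[x] += 1
--
--     return find_tsmax(dt), dt
--
-- def find_tsmax(dt: dict):
--
--     tsmax = -1
--     for y in dt.values():
--         if y > tsmax:
--             tsmax = y
--     return tsmax
-- ===== SOURCE B (Python) =====
-- def _read_and_sort(lst: list):
--     # Sort once, then scan runs of equal values (no per-element membership test);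
--     # max of the counts via the library max with default -1.
--     tmp = sorted(lst)
--     dt = {}
--     i = 0
--     while i < len(tmp):
--         j = i + 1
--         while j < len(tmp) and tmp[j] == tmp[i]:
--             j += 1
--         dt[tmp[i]] = j - i
--         i = j
--     return max(dt.values(), default=-1), dt
-- ===== Notes on version B (the rewrite author's own statement) =====
-- stated objective: simpler
-- what changed: B replaces the per-element dict membership/update loop plus the find_tsmax helper by a single run-scan over the sorted list (inner loop advances past each run of equal values) and a library max(values, default=-1).
import Mathlib
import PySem

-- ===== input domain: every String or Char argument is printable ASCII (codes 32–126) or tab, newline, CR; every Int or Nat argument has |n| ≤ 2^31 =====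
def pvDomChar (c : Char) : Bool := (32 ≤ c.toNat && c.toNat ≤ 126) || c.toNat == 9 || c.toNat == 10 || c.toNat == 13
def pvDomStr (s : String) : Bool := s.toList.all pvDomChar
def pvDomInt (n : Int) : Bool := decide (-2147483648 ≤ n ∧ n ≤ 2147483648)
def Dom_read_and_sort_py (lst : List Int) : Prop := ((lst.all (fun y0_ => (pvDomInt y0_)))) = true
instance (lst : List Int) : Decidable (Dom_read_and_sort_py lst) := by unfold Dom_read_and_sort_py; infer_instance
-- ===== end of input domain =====

-- B replaces A's per-element dict-membership loop + find_tsmax helper by one run-scan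
-- over the sorted list and a library max with default -1 (objective: simpler).


-- ===== PORT A =====
def find_tsmax (dt : PySem.Dict Int Int) : Int :=
  dt.values.foldl (fun tsmax y => if y > tsmax then y else tsmax) (-1)

def read_and_sort_py (lst : List Int) : Int × (List (Int × Int)) :=
  let tmp := PySem.List.sorted lst (fun x => x) false
  -- 'dt[x] += 1' reads dt[x], which the branch guarantees present; getD is exact there
  let dt := tmp.foldl (fun dt x =>
    if !(dt.contains x) then dt.insert x 1
    else dt.insert x (dt.getD x 0 + 1)) PySem.Dict.empty
  (find_tsmax dt, dt.items)

-- ===== PORT B =====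
-- the inner 'while tmp[j] == tmp[i]' run-scan of Source B, one run per step
def runs : List Int → List (Int × Int)
  | [] => []
  | x :: xs =>
      (x, 1 + ((xs.takeWhile (fun y => y == x)).length : Int)) ::
        runs (xs.dropWhile (fun y => y == x))
termination_by l => l.length
decreasing_by
  simp only [List.length_cons]
  exact Nat.lt_succ_of_le (List.length_dropWhile_le _ _)

def read_and_sort_py_alt (lst : List Int) : Int × (List (Int × Int)) :=
  let rs := runs (PySem.List.sorted lst (fun x => x) false)
  (PySem.List.maxD (rs.map (·.2)) (fun y => y) (-1), rs)

-- ===== PRECONDITION & SPEC =====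
def Spec_read_and_sort_py (lst : List Int) (out : Int × (List (Int × Int))) : Prop := out = read_and_sort_py_alt lst
instance (lst : List Int) (out : Int × (List (Int × Int))) : Decidable (Spec_read_and_sort_py lst out) := by unfold Spec_read_and_sort_py; infer_instance

-- ===== CLAIM (what is proved, stated in full; the proofs are below) =====
def Claim_equal_read_and_sort_py : Prop := ∀ (lst : List Int), Dom_read_and_sort_py lst → Spec_read_and_sort_py lst (read_and_sort_py lst)

-- ===== LEMMAS AND PROOFS =====

-- A's fold step is the counter step
lemma stepA_eq (d : PySem.Dict Int Int) (x : Int) :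
    (if !(d.contains x) then d.insert x 1 else d.insert x (d.getD x 0 + 1))
      = d.insert x (d.getD x 0 + 1) := by
  by_cases h : d.contains x = true
  · simp [h]
  · have hg : d.get? x = none := by
      simp only [PySem.Dict.get?, Option.map_eq_none_iff, List.find?_eq_none]
      intro p hp
      simp only [Bool.not_eq_true]
      by_contra hbeq
      apply h
      simp only [PySem.Dict.contains, List.any_eq_true]
      exact ⟨p, hp, by simpa using hbeq⟩
    simp [h, PySem.Dict.getD, hg]

lemma dictA_eq_counter (l : List Int) :
    (l.foldl (fun dt x =>
      if !(dt.contains x) then dt.insert x 1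
      else dt.insert x (dt.getD x 0 + 1)) PySem.Dict.empty)
      = PySem.Dict.counter l := by
  have hf : (fun (dt : PySem.Dict Int Int) (x : Int) =>
      if !(dt.contains x) then dt.insert x 1 else dt.insert x (dt.getD x 0 + 1))
      = fun dt x => dt.insert x (dt.getD x 0 + 1) := by
    funext d x; exact stepA_eq d x
  rw [hf, PySem.Dict.foldl_insert_getD_add_one_eq_counter]

-- folding Set.add over elements already present changes nothing
lemma foldl_add_of_mem (t : List Int) : ∀ (s : PySem.Set Int),
    (∀ y ∈ t, y ∈ s) → t.foldl PySem.Set.add s = s := by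
  induction t with
  | nil => intro s _; rfl
  | cons a as ih =>
      intro s hs
      have ha : PySem.Set.add s a = s := by
        simp [PySem.Set.add, PySem.Set.contains, hs a (by simp)]
      rw [List.foldl_cons, ha]
      exact ih s (fun y hy => hs y (by simp [hy]))

-- folding Set.add over a list avoiding x commutes with a leading x
lemma foldl_add_cons_of_not_mem (x : Int) (r : List Int) : ∀ (s : PySem.Set Int),
    x ∉ r → r.foldl PySem.Set.add (x :: s) = x :: r.foldl PySem.Set.add s := by
  induction r with
  | nil => intro s _; rfl
  | cons a as ih =>
      intro s hx
      have hax : a ≠ x := by intro h; exact hx (by simp [h])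
      have h1 : PySem.Set.add (x :: s) a = x :: PySem.Set.add s a := by
        simp only [PySem.Set.add, PySem.Set.contains, List.contains_cons]
        have hba : (a == x) = false := by simp [hax]
        rw [hba]
        by_cases hm : a ∈ s <;> simp [hm]
      rw [List.foldl_cons, h1, ih _ (fun h => hx (by simp [h])), List.foldl_cons]

lemma ofList_run (x : Int) (t r : List Int)
    (ht : ∀ y ∈ t, y = x) (hr : x ∉ r) :
    PySem.Set.ofList (x :: (t ++ r)) = x :: PySem.Set.ofList r := by
  rw [PySem.Set.ofList_eq_foldl, PySem.Set.ofList_eq_foldl]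
  rw [List.foldl_cons, List.foldl_append]
  have h0 : PySem.Set.add [] x = [x] := rfl
  rw [h0, foldl_add_of_mem t [x] (by intro y hy; simp [ht y hy])]
  exact foldl_add_cons_of_not_mem x r [] hr

lemma not_mem_dropWhile_beq (x : Int) : ∀ (xs : List Int),
    xs.Pairwise (· ≤ ·) → (∀ y ∈ xs, x ≤ y) →
    x ∉ xs.dropWhile (fun y => y == x) := by
  intro xs
  induction xs with
  | nil => intro _ _; simp
  | cons a as ih =>
      intro hp hle
      simp only [List.dropWhile_cons]
      by_cases hax : (a == x) = true
      · rw [if_pos hax]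
        exact ih hp.tail (fun y hy => hle y (by simp [hy]))
      · rw [if_neg hax]
        intro hmem
        rcases List.mem_cons.mp hmem with h | h
        · exact hax (by simp [h.symm])
        · have h1 : x ≤ a := hle a (by simp)
          have h2 : a ≤ x := (List.pairwise_cons.mp hp).1 x h
          exact hax (by simp; omega)

lemma counter_items_sorted : ∀ (l : List Int), l.Pairwise (· ≤ ·) →
    (PySem.Dict.counter l).items = runs l := by
  intro l
  induction l using runs.induct with
  | case1 => intro _; simp [PySem.Dict.items_counter, runs]
  | case2 x xs ih =>
      intro hp
      set t := xs.takeWhile (fun y => y == x) with htdef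
      set r := xs.dropWhile (fun y => y == x) with hrdef
      have hxs : t ++ r = xs := List.takeWhile_append_dropWhile
      have ht : ∀ y ∈ t, y = x := by
        intro y hy
        have := List.mem_takeWhile_imp hy
        simpa using this
      have hle : ∀ y ∈ xs, x ≤ y := (List.pairwise_cons.mp hp).1
      have hr : x ∉ r := not_mem_dropWhile_beq x xs hp.tail hle
      have hrp : r.Pairwise (· ≤ ·) :=
        List.Pairwise.sublist (List.dropWhile_sublist _) hp.tail
      rw [PySem.Dict.items_counter]
      have hcons : x :: xs = x :: (t ++ r) := by rw [hxs]
      rw [hcons, ofList_run x t r ht hr]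
      rw [List.map_cons]
      have hcx : (List.count x (x :: (t ++ r)) : Int) = 1 + (t.length : Int) := by
        have h1 : List.count x t = t.length :=
          List.count_eq_length.mpr (fun b hb => ((ht b hb).symm ▸ rfl))
        have h2 : List.count x r = 0 := List.count_eq_zero.mpr hr
        rw [List.count_cons_self, List.count_append, h1, h2]
        push_cast; omega
      have htail : (PySem.Set.ofList r).map (fun k => (k, (List.count k (x :: (t ++ r)) : Int)))
          = (PySem.Set.ofList r).map (fun k => (k, (List.count k r : Int))) := by
        apply List.map_congr_left
        intro k hk
        have hkr : k ∈ r := (PySem.Set.mem_ofList r k).mp hk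
        have hkx : k ≠ x := fun h => hr (h ▸ hkr)
        have h1 : List.count k t = 0 := by
          apply List.count_eq_zero.mpr
          intro hkt; exact hkx (ht k hkt)
        simp [List.count_cons, List.count_append, h1]
        exact Ne.symm hkx
      have hruns : runs (x :: xs) = (x, 1 + (t.length : Int)) :: runs r := by
        rw [runs]
      rw [htail, hcx, hxs, hruns, ← PySem.Dict.items_counter, ih hrp]

lemma runs_counts_pos : ∀ (l : List Int), ∀ p ∈ runs l, 1 ≤ p.2 := by
  intro l
  induction l using runs.induct with
  | case1 => simp [runs]
  | case2 x xs ih =>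
      intro p hp
      rw [runs] at hp
      rcases List.mem_cons.mp hp with h | h
      · subst h; simp
      · exact ih p h

-- find_tsmax's running max is max(values, default=-1) when all values ≥ 1
lemma tsmax_eq (l : List Int) (h : ∀ y ∈ l, 1 ≤ y) :
    l.foldl (fun tsmax y => if y > tsmax then y else tsmax) (-1)
      = PySem.List.maxD l (fun y => y) (-1) := by
  have hstep : (fun (tsmax y : Int) => if y > tsmax then y else tsmax)
      = fun a b => max a b := by
    funext a b
    by_cases hc : b ≤ a <;> simp [max_def] <;> omega
  cases l with
  | nil => rfl
  | cons x t =>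
      rw [hstep, PySem.List.maxD, PySem.List.max?_id_cons, Option.getD_some]
      rw [List.foldl_cons]
      have : max (-1 : Int) x = x := by
        have := h x (by simp); omega
      rw [this]

-- ===== VERDICT (by name: the statement is the Claim_ definition above) =====
theorem read_and_sort_py_spec : Claim_equal_read_and_sort_py := by
  intro lst _
  unfold Spec_read_and_sort_py read_and_sort_py read_and_sort_py_alt
  simp only []
  rw [dictA_eq_counter]
  have hsorted : (PySem.List.sorted lst (fun x => x) false).Pairwise (· ≤ ·) :=
    PySem.List.sorted_pairwise lst (fun x => x)
  have hitems := counter_items_sorted _ hsorted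
  rw [find_tsmax]
  have hvals : (PySem.Dict.counter (PySem.List.sorted lst (fun x => x) false)).values
      = (runs (PySem.List.sorted lst (fun x => x) false)).map (·.2) := by
    simp only [PySem.Dict.values, hitems]
  rw [hvals, hitems]
  congr 1
  apply tsmax_eq
  intro y hy
  rcases List.mem_map.mp hy with ⟨p, hp, hpy⟩
  exact hpy ▸ runs_counts_pos _ p hp
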